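-- pv_equiv track=rewrite | github.com/Musadalancikar/Codeforces-Python | 1294A-CollectingCoins.py | equal_coins
-- ===== SOURCE A (Python) =====
-- def equal_coins(a,b,c,n):
--     lst = [a,b,c]
--     max_number = max(lst)
--     result = 0
--     for i in lst:
--         result += abs((max_number) - i)
--
--     if n >= result and (n - result) % 3 == 0:
--         return "YES"
--     else:
--         return "NO"
-- ===== SOURCE B (Python) =====
-- def equal_coins(a, b, c, n):
--     # Target-level view: distributing everything equally means each pile ends
--     # at q = (a+b+c+n)/3 coins; feasible iff that is an integer and no pile
--     # already exceeds it (coins can only be added).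
--     q, r = divmod(a + b + c + n, 3)
--     return "YES" if r == 0 and q >= a and q >= b and q >= c else "NO"
-- ===== Notes on version B (the rewrite author's own statement) =====
-- stated objective: simpler
-- what changed: Instead of accumulating the per-pile deficits to the maximum and testing n against them, B computes the final target pile height q = (a+b+c+n)//3 via one divmod and answers YES iff the remainder is 0 and q is at least each of a, b, c; no max, no deficit, no loop.
import Mathlib
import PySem

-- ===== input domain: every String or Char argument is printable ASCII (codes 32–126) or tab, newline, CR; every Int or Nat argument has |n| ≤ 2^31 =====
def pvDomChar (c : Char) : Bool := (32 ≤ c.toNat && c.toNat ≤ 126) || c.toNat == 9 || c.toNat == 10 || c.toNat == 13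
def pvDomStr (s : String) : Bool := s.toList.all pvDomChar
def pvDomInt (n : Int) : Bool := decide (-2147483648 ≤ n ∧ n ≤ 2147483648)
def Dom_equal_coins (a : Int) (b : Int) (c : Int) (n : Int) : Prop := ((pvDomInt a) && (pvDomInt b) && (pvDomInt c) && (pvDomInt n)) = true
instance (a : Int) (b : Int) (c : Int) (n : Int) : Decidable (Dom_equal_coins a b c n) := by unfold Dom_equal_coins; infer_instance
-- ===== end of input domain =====

-- B replaces A's max/deficit accumulation loop by the target-pile-height view:
-- q = (a+b+c+n)//3 with remainder 0 and q ≥ each pile; equivalence proved on all inputs (objective: simpler).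

-- ===== PORT A =====
def equal_coins (a : Int) (b : Int) (c : Int) (n : Int) : String :=
  let lst : List Int := [a, b, c]
  let max_number : Int := (PySem.List.max? lst (fun x => x)).getD 0  -- max(lst); lst nonempty so never the default
  let result : Int := lst.foldl (fun r i => r + |max_number - i|) 0
  if n ≥ result ∧ PySem.Int.mod (n - result) 3 = 0 then "YES" else "NO"

-- ===== PORT B =====
def equal_coins_alt (a : Int) (b : Int) (c : Int) (n : Int) : String :=
  let qr : Int × Int := (PySem.Int.divmod? (a + b + c + n) 3).getD (0, 0)  -- divmod(·, 3): divisor 3 ≠ 0, never none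
  if qr.2 = 0 ∧ qr.1 ≥ a ∧ qr.1 ≥ b ∧ qr.1 ≥ c then "YES" else "NO"

-- ===== PRECONDITION & SPEC =====
def Spec_equal_coins (a : Int) (b : Int) (c : Int) (n : Int) (out : String) : Prop := out = equal_coins_alt a b c n
instance (a : Int) (b : Int) (c : Int) (n : Int) (out : String) : Decidable (Spec_equal_coins a b c n out) := by unfold Spec_equal_coins; infer_instance

-- ===== CLAIM (what is proved, stated in full; the proofs are below) =====
def Claim_equal_equal_coins : Prop := ∀ (a : Int) (b : Int) (c : Int) (n : Int), Dom_equal_coins a b c n → Spec_equal_coins a b c n (equal_coins a b c n)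

-- ===== LEMMAS AND PROOFS =====

-- The two YES-conditions are equivalent: n ≥ Σ(max−i) ∧ (n−Σ)%3=0  ↔  (a+b+c+n)%3=0 ∧ (a+b+c+n)/3 ≥ a,b,c.
theorem coins_cond_iff (a b c n : Int) :
    (n ≥ ([a, b, c].foldl (fun r i => r + |((PySem.List.max? [a, b, c] (fun x => x)).getD 0) - i|) 0)
       ∧ PySem.Int.mod (n - ([a, b, c].foldl (fun r i => r + |((PySem.List.max? [a, b, c] (fun x => x)).getD 0) - i|) 0)) 3 = 0)
    ↔ (((PySem.Int.divmod? (a + b + c + n) 3).getD (0, 0)).2 = 0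
       ∧ ((PySem.Int.divmod? (a + b + c + n) 3).getD (0, 0)).1 ≥ a
       ∧ ((PySem.Int.divmod? (a + b + c + n) 3).getD (0, 0)).1 ≥ b
       ∧ ((PySem.Int.divmod? (a + b + c + n) 3).getD (0, 0)).1 ≥ c) := by
  simp only [PySem.List.max?_id_cons, List.foldl, Option.getD_some]
  have ha : a ≤ max (max a b) c := le_trans (le_max_left a b) (le_max_left _ c)
  have hb : b ≤ max (max a b) c := le_trans (le_max_right a b) (le_max_left _ c)
  have hc : c ≤ max (max a b) c := le_max_right _ c
  rw [abs_of_nonneg (by omega), abs_of_nonneg (by omega), abs_of_nonneg (by omega)]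
  have h3 : (0:Int) < 3 := by norm_num
  have hd : ∀ x : Int, x.fdiv 3 = x / 3 := fun x => PySem.Int.floordiv_eq_ediv_of_pos h3
  have hm : ∀ x : Int, x.fmod 3 = x % 3 := fun x => PySem.Int.mod_eq_emod_of_pos h3
  simp only [PySem.Int.divmod?, PySem.Int.mod, hd, hm]
  norm_num
  set m := max (max a b) c with hm
  have hmcase : m = a ∨ m = b ∨ m = c := by
    rcases max_cases (max a b) c with ⟨h1, _⟩ | ⟨h1, _⟩
    · rcases max_cases a b with ⟨h2, _⟩ | ⟨h2, _⟩ <;> omega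
    · omega
  omega

-- ===== VERDICT (by name: the statement is the Claim_ definition above) =====
theorem equal_coins_spec : Claim_equal_equal_coins := by
  intro a b c n _
  unfold Spec_equal_coins equal_coins equal_coins_alt
  simp only []
  rcases (coins_cond_iff a b c n) with ⟨h1, h2⟩
  by_cases h : (n ≥ ([a, b, c].foldl (fun r i => r + |((PySem.List.max? [a, b, c] (fun x => x)).getD 0) - i|) 0)
       ∧ PySem.Int.mod (n - ([a, b, c].foldl (fun r i => r + |((PySem.List.max? [a, b, c] (fun x => x)).getD 0) - i|) 0)) 3 = 0)
  · rw [if_pos h, if_pos (h1 h)]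
  · rw [if_neg h, if_neg (fun hb => h (h2 hb))]
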